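-- pv_equiv track=rewrite | github.com/IndraPur1/Algorithm-Analysis-and-Strategy | Pertemuan 2/UjiKromosom.py | kromosom
-- ===== SOURCE A (Python) =====
-- def kromosom(A, i=0):
--     count = 0
--
--     if i >= len(A) - 1:
--         return 0
--
--     if A[i] == "X" and A[i+1] == "Y":
--         count += 1
--         return count + kromosom(A, i + 2)
--     else:
--         return kromosom(A, i + 1)
-- ===== SOURCE B (Python) =====
-- def kromosom(A, i=0):
--     n = len(A)
--     pairs = [j for j in range(i, n - 1) if A[j] == "X" and A[j + 1] == "Y"]
--     count = 0
--     blocked = i - 1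
--     for j in pairs:
--         if j > blocked:
--             count += 1
--             blocked = j + 1
--     return count
-- ===== Notes on version B (the rewrite author's own statement) =====
-- stated objective: alternative
-- what changed: Replaced A's non-tail recursion by two staged passes: a comprehension collecting all XY match positions, then a greedy left-to-right selection of non-overlapping positions with a 'blocked' cursor.
import Mathlib
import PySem

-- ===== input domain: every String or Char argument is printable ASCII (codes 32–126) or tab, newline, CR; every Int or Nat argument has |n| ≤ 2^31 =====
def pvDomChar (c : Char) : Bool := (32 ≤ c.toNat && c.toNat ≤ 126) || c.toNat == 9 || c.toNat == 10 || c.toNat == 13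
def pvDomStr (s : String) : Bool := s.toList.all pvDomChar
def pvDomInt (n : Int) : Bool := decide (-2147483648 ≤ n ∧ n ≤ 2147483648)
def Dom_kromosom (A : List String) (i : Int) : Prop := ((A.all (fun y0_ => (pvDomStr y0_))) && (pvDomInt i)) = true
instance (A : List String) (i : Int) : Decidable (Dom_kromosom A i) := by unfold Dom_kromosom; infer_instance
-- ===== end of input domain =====

-- B replaces A's recursion by two staged passes: collect the XY match positions, then greedily
-- select non-overlapping ones with a 'blocked' cursor (alternative decomposition, same cost).

-- ===== PORT A =====
-- A's recursion: base case when i >= len(A)-1, else look at A[i], A[i+1] (Python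
-- indexing may be negative; getD "" is only reached off Pre_, where Python raises).
def kromosom (A : List String) (i : Int) : Int :=
  if i ≥ (A.length : Int) - 1 then 0
  else if (PySem.List.pyGet? A i).getD "" = "X" ∧ (PySem.List.pyGet? A (i+1)).getD "" = "Y" then
    1 + kromosom A (i + 2)
  else
    kromosom A (i + 1)
termination_by ((A.length : Int) - i).toNat
decreasing_by all_goals (simp_all; omega)

-- ===== PORT B =====
-- Source B's comprehension: positions j in range(i, n-1) with A[j]=="X" and A[j+1]=="Y"
def kromosomPairs (A : List String) (i : Int) : List Int :=
  (PySem.List.pyRange i ((A.length : Int) - 1) 1).filter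
    (fun j => ((PySem.List.pyGet? A j).getD "" == "X") && ((PySem.List.pyGet? A (j+1)).getD "" == "Y"))

-- Source B's greedy for-loop: state (count, blocked)
def kromosomGreedy (st : Int × Int) (j : Int) : Int × Int :=
  if j > st.2 then (st.1 + 1, j + 1) else st

def kromosom_alt (A : List String) (i : Int) : Int :=
  ((kromosomPairs A i).foldl kromosomGreedy (0, i - 1)).1

-- ===== PRECONDITION & SPEC =====
-- Pre_ excludes exactly the inputs where Python A raises IndexError (i below -len(A)
-- with the recursion entered); B's first pass raises there too.
def Pre_kromosom (A : List String) (i : Int) : Prop :=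
  i ≥ (A.length : Int) - 1 ∨ i ≥ -(A.length : Int)
instance (A : List String) (i : Int) : Decidable (Pre_kromosom A i) := by unfold Pre_kromosom; infer_instance

def pvWitness_kromosom : List String × Int := (["X", "Y", "X", "X", "Y"], 0)

def Spec_kromosom (A : List String) (i : Int) (out : Int) : Prop := out = kromosom_alt A i
instance (A : List String) (i : Int) (out : Int) : Decidable (Spec_kromosom A i out) := by unfold Spec_kromosom; infer_instance

-- ===== CLAIM (what is proved, stated in full; the proofs are below) =====
def Claim_equal_kromosom : Prop := ∀ (A : List String) (i : Int), Dom_kromosom A i → Pre_kromosom A i → Spec_kromosom A i (kromosom A i)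

-- ===== LEMMAS AND PROOFS =====

-- unfolding lemmas for the first pass (the comprehension)
theorem kromosomPairs_nil (A : List String) (i : Int) (h : ¬ i < (A.length : Int) - 1) :
    kromosomPairs A i = [] := by
  rw [kromosomPairs, PySem.List.pyRange_one_eq_nil (by omega)]
  rfl

theorem kromosomPairs_step (A : List String) (i : Int) (h : i < (A.length : Int) - 1) :
    kromosomPairs A i =
      if ((PySem.List.pyGet? A i).getD "" == "X") && ((PySem.List.pyGet? A (i+1)).getD "" == "Y")
      then i :: kromosomPairs A (i+1) else kromosomPairs A (i+1) := by
  rw [kromosomPairs, PySem.List.pyRange_one_cons h, List.filter_cons]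
  rfl

-- Invariant: folding the greedy step over the match positions from i, starting with a
-- blocked cursor strictly below i, adds exactly A's recursive count to the accumulator.
theorem kromosomGreedy_eq (A : List String) (i : Int) (count blocked : Int)
    (hb : blocked < i) :
    ((kromosomPairs A i).foldl kromosomGreedy (count, blocked)).1 = count + kromosom A i := by
  by_cases h : i < (A.length : Int) - 1
  · by_cases hxy : (PySem.List.pyGet? A i).getD "" = "X" ∧ (PySem.List.pyGet? A (i+1)).getD "" = "Y"
    · -- position i is a match: it is selected (i > blocked), blocking i+1
      rw [kromosomPairs_step A i h, if_pos (by simp [hxy.1, hxy.2]), List.foldl_cons]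
      rw [show kromosomGreedy (count, blocked) i = (count + 1, i + 1) from by
        simp [kromosomGreedy, hb]]
      -- if i+1 is also a match it is skipped (i+1 = blocked); either way the fold over
      -- pairs from i+1 with blocked = i+1 equals the fold over pairs from i+2
      have hstep : ((kromosomPairs A (i+1)).foldl kromosomGreedy (count + 1, i + 1)).1
          = ((kromosomPairs A (i+2)).foldl kromosomGreedy (count + 1, i + 1)).1 := by
        by_cases h1 : i + 1 < (A.length : Int) - 1
        · rw [kromosomPairs_step A (i+1) h1]
          by_cases hxy1 : (((PySem.List.pyGet? A (i+1)).getD "" == "X")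
              && ((PySem.List.pyGet? A (i+1+1)).getD "" == "Y")) = true
          · rw [if_pos hxy1, List.foldl_cons]
            rw [show kromosomGreedy (count + 1, i + 1) (i+1) = (count + 1, i + 1) from by
              simp [kromosomGreedy]]
            rw [show i + 1 + 1 = i + 2 from by ring]
          · rw [if_neg hxy1, show i + 1 + 1 = i + 2 from by ring]
        · rw [kromosomPairs_nil A (i+1) h1, kromosomPairs_nil A (i+2) (by omega)]
      rw [hstep, kromosomGreedy_eq A (i+2) (count + 1) (i + 1) (by omega)]
      conv_rhs => rw [kromosom, if_neg (show ¬ i ≥ (A.length : Int) - 1 by omega), if_pos hxy]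
      ring
    · -- position i is not a match: the first pass drops it
      rw [kromosomPairs_step A i h, if_neg (by
        by_contra hc
        simp only [Bool.and_eq_true, beq_iff_eq] at hc
        exact hxy hc)]
      rw [kromosomGreedy_eq A (i+1) count blocked (by omega)]
      conv_rhs => rw [kromosom, if_neg (show ¬ i ≥ (A.length : Int) - 1 by omega), if_neg hxy]
  · rw [kromosomPairs_nil A i h, kromosom, if_pos (by omega)]
    simp
termination_by ((A.length : Int) - i).toNat
decreasing_by all_goals omega

-- ===== VERDICT (by name: the statement is the Claim_ definition above) =====
theorem kromosom_spec : Claim_equal_kromosom := by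
  intro A i _ _
  unfold Spec_kromosom kromosom_alt
  rw [kromosomGreedy_eq A i 0 (i - 1) (by omega)]
  ring
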